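-- pv_equiv track=rewrite | github.com/momonepal/Mancala_AI | mancala.py | sow
-- ===== SOURCE A (Python) =====
-- def get_opponent_id(player_id):
--     return (player_id + 1) % 2
--
-- def player_score_dish(player_id):
--     return (player_id + 1) * 7 - 1
--
-- def opponent_score_dish(player_id):
--     return player_score_dish(get_opponent_id(player_id))
--
-- def opposite_pit(pit_id):
--     return 12 - pit_id
--
-- def is_player_pit(pit_id, player_id):
--     if player_id == 0 and pit_id < 6:
--         return True
--     elif player_id == 1 and pit_id > 6 and pit_id < 13:
--         return True
--     else:
--         return False
--
-- def try_capture(pit_id, player_id, board):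
--     # If the last sown seed lands in an empty house owned by the player,
--     # and the opposite house contains seeds,
--     # both the last seed and the opposite seeds are captured
--     # and placed into the player's store.
--     if board[pit_id] != 1:
--         return board
--
--     if not is_player_pit(pit_id, player_id):
--         return board
--
--     opposite_pit_id = opposite_pit(pit_id)
--     if board[opposite_pit_id] == 0:
--         return board
--
--     new_board = board.copy()
--
--     new_board[player_score_dish(player_id)] += board[opposite_pit_id]
--     new_board[opposite_pit_id] = 0
--     new_board[player_score_dish(player_id)] += board[pit_id]
--     new_board[pit_id] = 0
--     return new_board
--
-- def sow(pit_id, player_id, board):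
--     # Players take turns sowing their seeds.
--     # On a turn, the player removes all seeds from one of the houses under their control.
--     if not is_player_pit(pit_id, player_id):
--         return player_id, board
--
--     # Moving counter-clockwise, the player drops one seed in each house in turn,
--     # including the player's own store but not their opponent's.
--     num_seeds = board[pit_id]
--     new_board = board.copy()
--     new_board[pit_id] = 0
--     curr_pit = pit_id
--     while num_seeds > 0:
--         curr_pit = (curr_pit + 1) % 14
--
--         # place seed (skipping original pit and opponent score)
--         if curr_pit != pit_id and curr_pit != opponent_score_dish(player_id):
--             new_board[curr_pit] += 1
--             num_seeds -= 1
--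
--     next_board = try_capture(curr_pit, player_id, new_board)
--     next_player = get_opponent_id(player_id)
--     # If the last sown seed lands in the player's store, the player gets an additional move.
--     # There is no limit on the number of moves a player can make in their turn.
--     if curr_pit == player_score_dish(player_id):
--         next_player = player_id
--
--     return next_player, next_board
-- ===== SOURCE B (Python) =====
-- # B: closed-form sowing — a lap-arithmetic pass (quotient/remainder over the cyclic list
-- # of landing pits) instead of A's per-seed while loop.
--
-- def _own_pits(player_id):
--     if player_id == 0:
--         return range(0, 6)
--     if player_id == 1:
--         return range(7, 13)
--     return range(0, 0)
--
-- def _capture(last, own_store, pits, board):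
--     # last sown seed in an own empty house captures it plus the opposite house
--     if board[last] != 1 or last not in pits:
--         return board
--     opposite = 12 - last
--     if board[opposite] == 0:
--         return board
--     new_board = board.copy()
--     new_board[own_store] += board[opposite] + 1
--     new_board[opposite] = 0
--     new_board[last] = 0
--     return new_board
--
-- def sow(pit_id, player_id, board):
--     if not ((player_id == 0 and pit_id < 6) or (player_id == 1 and 6 < pit_id < 13)):
--         return player_id, board
--     own_store = (player_id + 1) * 7 - 1
--     opp_store = 19 - own_store
--     # the landing pits, in sowing order, starting right after pit_id on the 14-pit ring
--     start = (pit_id + 1) % 14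
--     ring = list(range(start, 14)) + list(range(0, start))
--     order = [p for p in ring if p != opp_store and p != pit_id]
--     seeds = board[pit_id]
--     new_board = board.copy()
--     new_board[pit_id] = 0
--     if seeds > 0:
--         q, r = divmod(seeds, len(order))
--         for p in order:
--             new_board[p] += q
--         for p in order[:r]:
--             new_board[p] += 1
--         last = order[r - 1] if r > 0 else order[-1]
--     else:
--         last = pit_id
--     new_board = _capture(last, own_store, _own_pits(player_id), new_board)
--     next_player = player_id if last == own_store else 1 - player_id
--     return next_player, new_board
-- ===== Notes on version B (the rewrite author's own statement) =====
-- stated objective: alternative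
-- what changed: B replaces A's per-seed while loop with closed-form lap arithmetic: it builds the cyclic list of landing pits once, adds seeds // len(cycle) to every pit and 1 to the first seeds % len(cycle) pits, and computes the last sown pit by index instead of dropping seeds one at a time.
import Mathlib
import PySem

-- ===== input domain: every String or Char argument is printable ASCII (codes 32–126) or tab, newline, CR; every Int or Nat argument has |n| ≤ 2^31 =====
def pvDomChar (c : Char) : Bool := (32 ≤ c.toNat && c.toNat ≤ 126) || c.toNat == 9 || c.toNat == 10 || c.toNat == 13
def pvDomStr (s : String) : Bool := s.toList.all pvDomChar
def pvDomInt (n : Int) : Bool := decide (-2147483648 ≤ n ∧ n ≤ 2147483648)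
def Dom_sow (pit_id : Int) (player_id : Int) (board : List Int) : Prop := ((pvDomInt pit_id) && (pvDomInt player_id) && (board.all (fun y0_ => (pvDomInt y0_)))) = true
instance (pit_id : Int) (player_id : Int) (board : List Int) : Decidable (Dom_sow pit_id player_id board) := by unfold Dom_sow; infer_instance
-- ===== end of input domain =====

-- B replaces A's per-seed sowing loop with a closed-form quotient/remainder pass over the
-- 12-pit cycle (a different algorithm, similar cost on the measured inputs).  The claim is
-- about return values; neither program mutates its input.

-- ===== PORT A =====
def getOpponentId (player_id : Int) : Int := PySem.Int.mod (player_id + 1) 2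

def playerScoreDish (player_id : Int) : Int := (player_id + 1) * 7 - 1

def opponentScoreDish (player_id : Int) : Int := playerScoreDish (getOpponentId player_id)

def oppositePit (pit_id : Int) : Int := 12 - pit_id

def isPlayerPit (pit_id player_id : Int) : Bool :=
  if player_id = 0 ∧ pit_id < 6 then true
  else if player_id = 1 ∧ pit_id > 6 ∧ pit_id < 13 then true
  else false

def tryCapture (pit_id player_id : Int) (board : List Int) : List Int :=
  if PySem.List.pyGetD board pit_id 0 ≠ 1 then board
  else if ¬ (isPlayerPit pit_id player_id = true) then board
  else
    let opposite_pit_id := oppositePit pit_id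
    if PySem.List.pyGetD board opposite_pit_id 0 = 0 then board
    else
      -- new_board = board.copy(); the four in-place updates, in A's order
      let nb1 := PySem.List.pySetD board (playerScoreDish player_id)
        (PySem.List.pyGetD board (playerScoreDish player_id) 0 + PySem.List.pyGetD board opposite_pit_id 0)
      let nb2 := PySem.List.pySetD nb1 opposite_pit_id 0
      let nb3 := PySem.List.pySetD nb2 (playerScoreDish player_id)
        (PySem.List.pyGetD nb2 (playerScoreDish player_id) 0 + PySem.List.pyGetD board pit_id 0)
      PySem.List.pySetD nb3 pit_id 0

-- A's while body: `curr_pit = (curr_pit+1) % 14` repeats until the skip test passes (at most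
-- two of the 14 residues are skipped, so at most three steps), then one seed is placed.
-- nextPit is exactly that inner skip-scan; sowSeeds recurses once per placed seed.
def nextPit (pit_id opp : Int) (curr : Int) : Int :=
  let c1 := PySem.Int.mod (curr + 1) 14
  if c1 ≠ pit_id ∧ c1 ≠ opp then c1
  else
    let c2 := PySem.Int.mod (c1 + 1) 14
    if c2 ≠ pit_id ∧ c2 ≠ opp then c2
    else PySem.Int.mod (c2 + 1) 14

def sowSeeds (pit_id opp : Int) : Nat → Int → List Int → Int × List Int
  | 0, curr, b => (curr, b)
  | n + 1, curr, b =>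
    let c := nextPit pit_id opp curr
    sowSeeds pit_id opp n c (PySem.List.pySetD b c (PySem.List.pyGetD b c 0 + 1))

def sow (pit_id : Int) (player_id : Int) (board : List Int) : Int × List Int :=
  if ¬ (isPlayerPit pit_id player_id = true) then (player_id, board)
  else
    let num_seeds := PySem.List.pyGetD board pit_id 0
    let new_board := PySem.List.pySetD board pit_id 0
    let res := sowSeeds pit_id (opponentScoreDish player_id) num_seeds.toNat pit_id new_board
    let next_board := tryCapture res.1 player_id res.2
    let next_player := if res.1 = playerScoreDish player_id then player_id else getOpponentId player_id
    (next_player, next_board)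

-- ===== PORT B =====
def ownPits (player_id : Int) : List Int :=
  if player_id = 0 then PySem.List.pyRange 0 6 1
  else if player_id = 1 then PySem.List.pyRange 7 13 1
  else PySem.List.pyRange 0 0 1

def captureAlt (last own_store : Int) (pits : List Int) (board : List Int) : List Int :=
  if PySem.List.pyGetD board last 0 ≠ 1 ∨ ¬ (pits.contains last = true) then board
  else
    let opposite := 12 - last
    if PySem.List.pyGetD board opposite 0 = 0 then board
    else
      let nb1 := PySem.List.pySetD board own_store
        (PySem.List.pyGetD board own_store 0 + PySem.List.pyGetD board opposite 0 + 1)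
      let nb2 := PySem.List.pySetD nb1 opposite 0
      PySem.List.pySetD nb2 last 0

def sow_alt (pit_id : Int) (player_id : Int) (board : List Int) : Int × List Int :=
  if ¬ ((player_id = 0 ∧ pit_id < 6) ∨ (player_id = 1 ∧ 6 < pit_id ∧ pit_id < 13)) then
    (player_id, board)
  else
    let own_store := (player_id + 1) * 7 - 1
    let opp_store := 19 - own_store
    -- the landing pits, in sowing order, starting right after pit_id on the 14-pit ring
    let start := PySem.Int.mod (pit_id + 1) 14
    let ring := PySem.List.pyRange start 14 1 ++ PySem.List.pyRange 0 start 1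
    let order := ring.filter (fun x => x ≠ opp_store ∧ x ≠ pit_id)
    let seeds := PySem.List.pyGetD board pit_id 0
    let nb := PySem.List.pySetD board pit_id 0
    let res :=
      if 0 < seeds then
        let q := PySem.Int.floordiv seeds (PySem.List.len order)
        let r := PySem.Int.mod seeds (PySem.List.len order)
        let nb1 := order.foldl (fun bb p => PySem.List.pySetD bb p (PySem.List.pyGetD bb p 0 + q)) nb
        let nb2 := (PySem.List.slice order none (some r)).foldl
          (fun bb p => PySem.List.pySetD bb p (PySem.List.pyGetD bb p 0 + 1)) nb1
        let last := if 0 < r then PySem.List.pyGetD order (r - 1) 0 else PySem.List.pyGetD order (-1) 0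
        (last, nb2)
      else (pit_id, nb)
    let next_board := captureAlt res.1 own_store (ownPits player_id) res.2
    let next_player := if res.1 = own_store then player_id else 1 - player_id
    (next_player, next_board)

-- ===== PRECONDITION & SPEC =====
-- Pre_ admits every input on which the move is a rejected move, and sowing moves on boards
-- with a valid pit index and (when there are seeds to sow) at least the 14 standard pits.
-- It excludes boards shorter than 14 pits in the sowing branch: there A usually raises
-- IndexError and otherwise returns only because the seeds run out before a missing index;
-- B raises IndexError whenever its full lap leaves such a board (see claim cites).
def Pre_sow (pit_id : Int) (player_id : Int) (board : List Int) : Prop :=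
  ((player_id = 0 ∧ pit_id < 6) ∨ (player_id = 1 ∧ 6 < pit_id ∧ pit_id < 13)) →
    (PySem.Raise.InRange board.length pit_id ∧
      (0 < PySem.List.pyGetD board pit_id 0 → 14 ≤ board.length))
instance (pit_id : Int) (player_id : Int) (board : List Int) : Decidable (Pre_sow pit_id player_id board) := by
  unfold Pre_sow; infer_instance

def pvWitness_sow : Int × Int × List Int := (2, 0, [4, 4, 4, 4, 4, 4, 0, 4, 4, 4, 4, 4, 4, 0])

def Spec_sow (pit_id : Int) (player_id : Int) (board : List Int) (out : Int × List Int) : Prop :=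
  out = sow_alt pit_id player_id board
instance (pit_id : Int) (player_id : Int) (board : List Int) (out : Int × List Int) : Decidable (Spec_sow pit_id player_id board out) := by
  unfold Spec_sow; infer_instance

-- ===== CLAIM (what is proved, stated in full; the proofs are below) =====
def Claim_equal_sow : Prop := ∀ (pit_id : Int) (player_id : Int) (board : List Int), Dom_sow pit_id player_id board → Pre_sow pit_id player_id board → Spec_sow pit_id player_id board (sow pit_id player_id board)

-- ===== LEMMAS AND PROOFS =====

-- a fold of "+k at pit p" updates, pointwise: each index gains k per occurrence in s
lemma foldl_addk (k : Int) (s : List Int) : ∀ (b : List Int),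
    (∀ x ∈ s, 0 ≤ x ∧ x.toNat < b.length) →
    (s.foldl (fun bb p => PySem.List.pySetD bb p (PySem.List.pyGetD bb p 0 + k)) b).length = b.length ∧
    ∀ i : Nat,
      (s.foldl (fun bb p => PySem.List.pySetD bb p (PySem.List.pyGetD bb p 0 + k)) b)[i]? =
        if i < b.length then some (b.getD i 0 + k * (s.count (i : Int))) else none := by
  induction s with
  | nil =>
      intro b _
      refine ⟨rfl, fun i => ?_⟩
      rcases Nat.lt_or_ge i b.length with h | h
      · simp [h]
      · simp [Nat.not_lt.2 h]
  | cons x s ih =>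
      intro b hmem
      have hx := hmem x (List.mem_cons_self)
      have hxv : PySem.List.pyGetD b x 0 = b[x.toNat]'hx.2 :=
        PySem.List.pyGetD_eq_getElem b 0 hx.1 (by omega)
      have hset : PySem.List.pySetD b x (PySem.List.pyGetD b x 0 + k)
          = b.set x.toNat (PySem.List.pyGetD b x 0 + k) := PySem.List.pySetD_of_nonneg b _ hx.1
      have hlen' : (PySem.List.pySetD b x (PySem.List.pyGetD b x 0 + k)).length = b.length := by
        rw [hset]; simp
      have hmem' : ∀ y ∈ s, 0 ≤ y ∧ y.toNat < (PySem.List.pySetD b x (PySem.List.pyGetD b x 0 + k)).length := by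
        intro y hy; rw [hlen']; exact hmem y (List.mem_cons_of_mem _ hy)
      obtain ⟨ihl, ihp⟩ := ih _ hmem'
      refine ⟨by simpa [List.foldl_cons, hlen'] using ihl, fun i => ?_⟩
      rw [List.foldl_cons]
      rw [ihp i, hlen']
      rcases Nat.lt_or_ge i b.length with h | h
      · rw [if_pos h, if_pos h]
        have hgd : (PySem.List.pySetD b x (PySem.List.pyGetD b x 0 + k)).getD i 0
            = (b.set x.toNat (PySem.List.pyGetD b x 0 + k)).getD i 0 := by rw [hset]
        rw [hgd]
        have hb : b.getD i 0 = b[i]'h := List.getD_eq_getElem b 0 h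
        have hset_i : (b.set x.toNat (PySem.List.pyGetD b x 0 + k)).getD i 0
            = if x.toNat = i then PySem.List.pyGetD b x 0 + k else b[i]'h := by
          rw [List.getD_eq_getElem _ 0 (by simpa using h)]
          simp [List.getElem_set]
        rw [hset_i]
        by_cases hix : x.toNat = i
        · have hxi : x = (i : Int) := by omega
          rw [if_pos hix]
          have : (x :: s).count (i : Int) = s.count (i : Int) + 1 := by
            simp [hxi]
          rw [this, hxv, hb]
          have : b[i]'h = b[x.toNat]'hx.2 := by congr 1; omega
          rw [this]
          congr 1
          push_cast
          ring
        · have hxi : x ≠ (i : Int) := by omega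
          rw [if_neg hix]
          have : (x :: s).count (i : Int) = s.count (i : Int) := by
            simp [hxi]
          rw [this, hb]
      · rw [if_neg (Nat.not_lt.2 h), if_neg (Nat.not_lt.2 h)]

lemma map_getD_range_take (L : List Int) (r : Nat) (hr : r ≤ L.length) :
    (List.range r).map (fun j => L.getD (j % L.length) 0) = L.take r := by
  apply List.ext_getElem
  · simp [Nat.min_eq_left hr]
  · intro i h1 h2
    simp only [List.getElem_map, List.getElem_range, List.getElem_take]
    have hi : i < L.length := lt_of_lt_of_le (by simpa using h1) hr
    rw [Nat.mod_eq_of_lt hi, List.getD_eq_getElem _ 0 hi]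

lemma count_flatten_replicate (L : List Int) (v : Int) :
    ∀ q : Nat, ((List.replicate q L).flatten).count v = q * L.count v := by
  intro q; induction q with
  | zero => simp
  | succ q ih => simp [List.replicate_succ, ih, Nat.succ_mul]; ring

lemma range_mod_split (L : List Int) : ∀ (q r : Nat), r ≤ L.length →
    (List.range (q * L.length + r)).map (fun j => L.getD (j % L.length) 0)
      = (List.replicate q L).flatten ++ L.take r := by
  intro q; induction q with
  | zero => intro r hr; simpa using map_getD_range_take L r hr
  | succ q ih =>
      intro r hr
      have h1 : (q + 1) * L.length + r = L.length + (q * L.length + r) := by ring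
      rw [h1, List.range_add, List.map_append, List.map_map]
      have h2 : (List.range L.length).map (fun j => L.getD (j % L.length) 0) = L := by
        rw [map_getD_range_take L L.length le_rfl, List.take_length]
      have h3 : ((List.range (q * L.length + r)).map
            ((fun j => L.getD (j % L.length) 0) ∘ (fun i => L.length + i)))
          = (List.range (q * L.length + r)).map (fun j => L.getD (j % L.length) 0) := by
        apply List.map_congr_left
        intro j _
        simp [Nat.add_mod_left]
      rw [h2, h3, ih r hr]
      simp [List.replicate_succ]

lemma sowSeeds_aux (pit opp : Int) (L : List Int)
    (hcyc : ∀ i : Nat, i < L.length →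
      nextPit pit opp (L.getD i 0) = L.getD ((i + 1) % L.length) 0) :
    ∀ (n : Nat) (i : Nat), i < L.length → ∀ b : List Int,
      sowSeeds pit opp n (L.getD i 0) b =
        (L.getD ((i + n) % L.length) 0,
         ((List.range n).map (fun j => L.getD ((i + 1 + j) % L.length) 0)).foldl
           (fun bb p => PySem.List.pySetD bb p (PySem.List.pyGetD bb p 0 + 1)) b) := by
  intro n
  induction n with
  | zero =>
      intro i hi b
      simp [sowSeeds, Nat.mod_eq_of_lt hi]
  | succ n ih =>
      intro i hi b
      have hlen : 0 < L.length := lt_of_le_of_lt (Nat.zero_le _) hi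
      simp only [sowSeeds]
      rw [hcyc i hi]
      have hi' : (i + 1) % L.length < L.length := Nat.mod_lt _ hlen
      rw [ih ((i + 1) % L.length) hi' _]
      have hidx : ((i + 1) % L.length + n) % L.length = (i + (n + 1)) % L.length := by
        rw [Nat.mod_add_mod]; congr 1; omega
      have hseq : (List.range (n + 1)).map (fun j => L.getD ((i + 1 + j) % L.length) 0)
          = L.getD ((i + 1) % L.length) 0 ::
            (List.range n).map (fun j => L.getD (((i + 1) % L.length + 1 + j) % L.length) 0) := by
        rw [List.range_succ_eq_map, List.map_cons, List.map_map]
        congr 1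
        apply List.map_congr_left
        intro j _
        show L.getD ((i + 1 + (j + 1)) % L.length) 0
            = L.getD (((i + 1) % L.length + 1 + j) % L.length) 0
        congr 1
        rw [Nat.add_assoc ((i + 1) % L.length) 1 j, Nat.mod_add_mod]
        congr 1
        omega
      rw [hidx, hseq, List.foldl_cons]


lemma sowSeeds_closed (pit opp : Int) (L : List Int) (hL : 0 < L.length)
    (h0 : nextPit pit opp pit = L.getD 0 0)
    (hcyc : ∀ i : Nat, i < L.length →
      nextPit pit opp (L.getD i 0) = L.getD ((i + 1) % L.length) 0) :
    ∀ (n : Nat), 0 < n → ∀ b : List Int,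
      sowSeeds pit opp n pit b =
        (L.getD ((n - 1) % L.length) 0,
         ((List.range n).map (fun j => L.getD (j % L.length) 0)).foldl
           (fun bb p => PySem.List.pySetD bb p (PySem.List.pyGetD bb p 0 + 1)) b) := by
  intro n hn b
  obtain ⟨m, rfl⟩ : ∃ m, n = m + 1 := ⟨n - 1, by omega⟩
  simp only [sowSeeds]
  rw [h0, sowSeeds_aux pit opp L hcyc m 0 hL]
  have hidx : (0 + m) % L.length = (m + 1 - 1) % L.length := by congr 1; omega
  have hseq : (List.range (m + 1)).map (fun j => L.getD (j % L.length) 0)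
      = L.getD 0 0 :: (List.range m).map (fun j => L.getD ((0 + 1 + j) % L.length) 0) := by
    rw [List.range_succ_eq_map, List.map_cons, List.map_map]
    congr 1
    apply List.map_congr_left
    intro j _
    show L.getD ((j + 1) % L.length) 0 = L.getD ((0 + 1 + j) % L.length) 0
    have hj : j + 1 = 0 + 1 + j := by omega
    rw [hj]
  rw [hidx, hseq, List.foldl_cons]

lemma isPlayerPit_iff (pit p : Int) :
    isPlayerPit pit p = true ↔ ((p = 0 ∧ pit < 6) ∨ (p = 1 ∧ 6 < pit ∧ pit < 13)) := by
  unfold isPlayerPit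
  split_ifs with h1 h2 <;> simp_all

lemma contains_ownPits (p pit : Int) :
    (ownPits p).contains pit = true ↔
      ((p = 0 ∧ 0 ≤ pit ∧ pit < 6) ∨ (p = 1 ∧ 7 ≤ pit ∧ pit < 13)) := by
  unfold ownPits
  split_ifs with h1 h2 <;>
    simp_all [PySem.List.mem_pyRange_one]

lemma set_shuffle (nb : List Int) (s j l : Nat) (hjs : j ≠ s) (a v : Int) :
    ((((nb.set s a).set j 0).set s v).set l 0) = (((nb.set s v).set j 0).set l 0) := by
  rw [List.set_comm _ _ hjs, List.set_set]

lemma capture_equiv (p last : Int) (hp : p = 0 ∨ p = 1) (h0 : 0 ≤ last) (h14 : last < 14)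
    (nb : List Int) (hlen : 14 ≤ nb.length) :
    tryCapture last p nb = captureAlt last ((p + 1) * 7 - 1) (ownPits p) nb := by
  unfold tryCapture captureAlt
  simp only [playerScoreDish, oppositePit]
  by_cases hv : PySem.List.pyGetD nb last 0 = 1
  · simp only [hv, ne_eq, not_true_eq_false, if_false, false_or]
    by_cases hpp : isPlayerPit last p = true
    · have hcts : (ownPits p).contains last = true := by
        rw [contains_ownPits]
        rcases hp with rfl | rfl <;> rcases (isPlayerPit_iff last _).1 hpp with h | h <;>
          first | (exact Or.inl ⟨rfl, h0, h.2⟩) | (exact Or.inr ⟨rfl, by omega, h.2.2⟩) | omega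
      have hrange : (p = 0 ∧ last < 6) ∨ (p = 1 ∧ 6 < last ∧ last < 13) :=
        (isPlayerPit_iff last p).1 hpp
      simp only [hpp, not_true_eq_false, if_false, hcts]
      by_cases hop : PySem.List.pyGetD nb (12 - last) 0 = 0
      · simp [hop]
      · rw [if_neg hop, if_neg hop]
        -- both sides capture; reduce to List.set chains
        have hst : (0 : Int) ≤ (p + 1) * 7 - 1 := by rcases hp with rfl | rfl <;> norm_num
        have hopp0 : (0 : Int) ≤ 12 - last := by
          rcases hrange with ⟨_, h⟩ | ⟨_, h⟩ <;> omega
        set st := ((p + 1) * 7 - 1 : Int) with hstdef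
        set o := PySem.List.pyGetD nb (12 - last) 0 with hodef
        set s6 := PySem.List.pyGetD nb st 0 with hs6def
        have hstlt : st.toNat < nb.length := by
          rcases hp with rfl | rfl <;> simp [hstdef] <;> omega
        have hjne : (12 - last).toNat ≠ st.toNat := by
          rcases hrange with ⟨hq, h⟩ | ⟨hq, h⟩ <;> rw [hq] at hstdef <;> simp [hstdef] <;> omega
        -- rewrite every pySetD / inner pyGetD to set / getElem form
        rw [PySem.List.pySetD_of_nonneg nb _ hst, PySem.List.pySetD_of_nonneg _ _ hopp0,
            PySem.List.pySetD_of_nonneg _ _ hst, PySem.List.pySetD_of_nonneg _ _ h0,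
            PySem.List.pySetD_of_nonneg nb _ hst, PySem.List.pySetD_of_nonneg _ _ hopp0,
            PySem.List.pySetD_of_nonneg _ _ h0]
        have hinner : PySem.List.pyGetD ((nb.set st.toNat (s6 + o)).set (12 - last).toNat 0) st 0
            = s6 + o := by
          rw [PySem.List.pyGetD_eq_getElem _ 0 hst (by simp; omega)]
          rw [List.getElem_set_ne (by omega) (by simp; omega)]
          rw [List.getElem_set_self (by simp; omega)]
        rw [hinner]
        exact set_shuffle nb st.toNat (12 - last).toNat last.toNat hjne (s6 + o) (s6 + o + 1)
    · have hcts : ¬ ((ownPits p).contains last = true) := by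
        rw [contains_ownPits]
        intro h
        apply hpp
        rw [isPlayerPit_iff]
        rcases h with ⟨h1, h2⟩ | ⟨h1, h2⟩
        · exact Or.inl ⟨h1, h2.2⟩
        · exact Or.inr ⟨h1, by omega, h2.2⟩
      have hmemn : last ∉ ownPits p := by
        simpa [List.contains_iff_mem] using hcts
      simp [hpp, hmemn]
  · simp [hv]


lemma getOpponentId_eq (p : Int) (hp : p = 0 ∨ p = 1) : getOpponentId p = 1 - p := by
  rcases hp with rfl | rfl <;> decide

-- Python index normalisation: a wrapped (possibly negative) in-range index
def pyNormIdx (n : Nat) (i : Int) : Nat := if 0 ≤ i then i.toNat else ((n : Int) + i).toNat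

lemma py_idx_norm (xs : List Int) (i : Int) (h : PySem.Raise.InRange xs.length i) :
    pyNormIdx xs.length i < xs.length ∧
      (∀ d : Int, PySem.List.pyGetD xs i d = xs.getD (pyNormIdx xs.length i) d) ∧
      (∀ v : Int, PySem.List.pySetD xs i v = xs.set (pyNormIdx xs.length i) v) := by
  obtain ⟨h1, h2⟩ := h
  unfold pyNormIdx
  by_cases hi : 0 ≤ i
  · rw [if_pos hi]
    refine ⟨by omega, fun d => ?_, fun v => PySem.List.pySetD_of_nonneg xs v hi⟩
    rw [PySem.List.pyGetD_eq_getElem xs d hi h2, List.getD_eq_getElem _ _ (by omega)]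
  · rw [if_neg hi]
    have hk : xs.length - (-i).toNat = ((xs.length : Int) + i).toNat := by omega
    refine ⟨by omega, fun d => ?_, fun v => ?_⟩
    · simp only [PySem.List.pyGetD, PySem.List.pyGet?, PySem.List.pyIdx?]
      rw [if_neg hi, if_pos h1]
      simp [hk, List.getD_eq_getElem?_getD]
    · simp only [PySem.List.pySetD, PySem.List.pySet?, PySem.List.pyIdx?]
      rw [if_neg hi, if_pos h1]
      simp [hk]

-- A's skip test 'curr_pit != pit_id' never fires for a negative pit_id
def nextPitN (opp curr : Int) : Int :=
  let c1 := PySem.Int.mod (curr + 1) 14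
  if c1 ≠ opp then c1
  else
    let c2 := PySem.Int.mod (c1 + 1) 14
    if c2 ≠ opp then c2 else PySem.Int.mod (c2 + 1) 14

lemma nextPit_of_neg {pit : Int} (hpit : pit < 0) (opp curr : Int) :
    nextPit pit opp curr = nextPitN opp curr := by
  unfold nextPit nextPitN
  have e : ∀ a : Int, PySem.Int.mod a 14 = a % 14 := fun a =>
    PySem.Int.mod_eq_emod_of_pos (by norm_num)
  simp only [e]
  have hn14 : (14:Int) ≠ 0 := by norm_num
  have h1 : (curr + 1) % 14 ≠ pit := by
    have := Int.emod_nonneg (curr + 1) hn14; omega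
  have h2 : ((curr + 1) % 14 + 1) % 14 ≠ pit := by
    have := Int.emod_nonneg ((curr + 1) % 14 + 1) hn14; omega
  by_cases ha : (curr + 1) % 14 = opp
  · rw [if_neg (fun hc => hc.2 ha), if_neg (not_not_intro ha)]
    by_cases hb : ((curr + 1) % 14 + 1) % 14 = opp
    · rw [if_neg (fun hc => hc.2 hb), if_neg (not_not_intro hb)]
    · rw [if_pos ⟨h2, hb⟩, if_pos hb]
  · rw [if_pos ⟨h1, ha⟩, if_pos ha]

-- for a negative pit_id, the 'x ≠ pit_id' part of B's filter is vacuous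
lemma filter_drop_pit (l : List Int) (opp pit : Int) (hneg : pit < 0)
    (hnn : ∀ x ∈ l, 0 ≤ x) :
    l.filter (fun x => x ≠ opp ∧ x ≠ pit) = l.filter (fun x => x ≠ opp) := by
  apply List.filter_congr
  intro x hx
  have h := hnn x hx
  have hne : x ≠ pit := by omega
  simp [hne]

lemma sow_branch (pit p : Int) (board : List Int) (L : List Int)
    (hp : p = 0 ∨ p = 1)
    (hG : (p = 0 ∧ pit < 6) ∨ (p = 1 ∧ 6 < pit ∧ pit < 13))
    (hA : isPlayerPit pit p = true)
    (hLdef : ((PySem.List.pyRange (PySem.Int.mod (pit + 1) 14) 14 1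
        ++ PySem.List.pyRange 0 (PySem.Int.mod (pit + 1) 14) 1).filter
          (fun x => x ≠ 19 - ((p + 1) * 7 - 1) ∧ x ≠ pit)) = L)
    (hLpos : 0 < L.length)
    (hmem : ∀ x ∈ L, 0 ≤ x ∧ x < 14)
    (h0 : nextPit pit (opponentScoreDish p) pit = L.getD 0 0)
    (hcyc : ∀ i : Nat, i < L.length →
      nextPit pit (opponentScoreDish p) (L.getD i 0) = L.getD ((i + 1) % L.length) 0)
    (hzbpit : PySem.List.pyGetD (PySem.List.pySetD board pit 0) pit 0 = 0)
    (hbig : 0 < PySem.List.pyGetD board pit 0 → 14 ≤ board.length) :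
    sow pit p board = sow_alt pit p board := by
  unfold sow sow_alt
  rw [hA]
  simp only [not_true, if_false, if_neg (not_not_intro hG)]
  rw [hLdef, PySem.List.len_eq]
  set seeds := PySem.List.pyGetD board pit 0 with hseedsdef
  set zb := PySem.List.pySetD board pit 0 with hzbdef
  have hzblen : zb.length = board.length := PySem.List.length_pySetD board pit 0
  by_cases hs : 0 < seeds
  · -- sowing happens
    have h14 : 14 ≤ board.length := hbig hs
    set n := seeds.toNat with hndef
    have hn : 0 < n := by omega
    have hseedsn : seeds = (n : Int) := by omega
    rw [sowSeeds_closed pit (opponentScoreDish p) L hLpos h0 hcyc n hn zb, if_pos hs]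
    have hlpos' : (0:Int) < (L.length : Int) := by exact_mod_cast hLpos
    rw [PySem.Int.floordiv_eq_ediv_of_pos hlpos', PySem.Int.mod_eq_emod_of_pos hlpos']
    have hcast_div : seeds / (L.length : Int) = ((n / L.length : Nat) : Int) := by
      rw [hseedsn]; exact (Int.natCast_div n L.length).symm
    have hcast_mod : seeds % (L.length : Int) = ((n % L.length : Nat) : Int) := by
      rw [hseedsn]; exact (Int.natCast_emod n L.length).symm
    have hr0 : 0 ≤ seeds % (L.length : Int) := by rw [hcast_mod]; exact Int.natCast_nonneg _
    have hrtn : (seeds % (L.length : Int)).toNat = n % L.length := by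
      rw [hcast_mod]; exact Int.toNat_natCast _
    rw [PySem.List.slice_to L hr0, hrtn]
    have hn' : n = n / L.length * L.length + n % L.length := by
      rw [Nat.mul_comm]; exact (Nat.div_add_mod n L.length).symm
    have hmodlem : ∀ a c : Nat, (a * L.length + c) % L.length = c % L.length := by
      intro a c; rw [Nat.mul_comm]; exact Nat.mul_add_mod _ _ _
    have hrlt : n % L.length < L.length := Nat.mod_lt _ hLpos
    -- the two final boards are equal
    have hmemL : ∀ x ∈ L, 0 ≤ x ∧ x.toNat < zb.length := by
      intro x hx; obtain ⟨h1, h2⟩ := hmem x hx; exact ⟨h1, by omega⟩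
    set seqA := (List.range n).map (fun j => L.getD (j % L.length) 0) with hseqAdef
    have hseqAsub : ∀ x ∈ seqA, x ∈ L := by
      intro x hx
      rw [hseqAdef] at hx
      obtain ⟨j, _, rfl⟩ := List.mem_map.1 hx
      rw [List.getD_eq_getElem _ 0 (Nat.mod_lt _ hLpos)]
      exact List.getElem_mem _
    have hmemA : ∀ x ∈ seqA, 0 ≤ x ∧ x.toNat < zb.length := fun x hx => hmemL x (hseqAsub x hx)
    obtain ⟨lenA, ptA⟩ := foldl_addk 1 seqA zb hmemA
    obtain ⟨lenB1, ptB1⟩ := foldl_addk (seeds / (L.length : Int)) L zb hmemL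
    set B1 := L.foldl
      (fun bb q => PySem.List.pySetD bb q (PySem.List.pyGetD bb q 0 + seeds / (L.length : Int))) zb
      with hB1def
    have hmemT : ∀ x ∈ L.take (n % L.length), 0 ≤ x ∧ x.toNat < B1.length := by
      intro x hx
      obtain ⟨h1, h2⟩ := hmemL x (List.mem_of_mem_take hx)
      exact ⟨h1, by rw [lenB1]; omega⟩
    obtain ⟨lenB2, ptB2⟩ := foldl_addk 1 (L.take (n % L.length)) B1 hmemT
    have hsplitseq : seqA = (List.replicate (n / L.length) L).flatten ++ L.take (n % L.length) := by
      rw [hseqAdef]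
      conv_lhs => rw [hn']
      exact range_mod_split L (n / L.length) (n % L.length) (le_of_lt hrlt)
    have hboards :
        seqA.foldl (fun bb q => PySem.List.pySetD bb q (PySem.List.pyGetD bb q 0 + 1)) zb
          = (L.take (n % L.length)).foldl
              (fun bb q => PySem.List.pySetD bb q (PySem.List.pyGetD bb q 0 + 1)) B1 := by
      apply List.ext_getElem?
      intro idx
      rw [ptA idx, ptB2 idx, lenB1]
      rcases Nat.lt_or_ge idx zb.length with h | h
      · rw [if_pos h, if_pos h]
        have hB1idx : B1.getD idx 0
            = zb.getD idx 0 + seeds / (L.length : Int) * (L.count (idx : Int)) := by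
          rw [List.getD_eq_getElem?_getD, ptB1 idx, if_pos h]
          rfl
        rw [hB1idx]
        have hcnt : seqA.count (idx : Int)
            = n / L.length * L.count (idx : Int) + (L.take (n % L.length)).count (idx : Int) := by
          rw [hsplitseq, List.count_append, count_flatten_replicate]
        rw [hcnt, hcast_div]
        congr 1
        push_cast
        ring
      · rw [if_neg (Nat.not_lt.2 h), if_neg (Nat.not_lt.2 h)]
    rw [hboards]
    -- the last sown pit is the same
    have hlast : L.getD ((n - 1) % L.length) 0
        = (if 0 < seeds % (L.length : Int) then PySem.List.pyGetD L (seeds % (L.length : Int) - 1) 0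
           else PySem.List.pyGetD L (-1) 0) := by
      by_cases hrpos : 0 < seeds % (L.length : Int)
      · rw [if_pos hrpos]
        have hrp : 0 < n % L.length := by
          rw [hcast_mod] at hrpos; exact_mod_cast hrpos
        have h1 : seeds % (L.length : Int) - 1 = ((n % L.length - 1 : Nat) : Int) := by
          rw [hcast_mod]; omega
        rw [h1, PySem.List.pyGetD_natCast]
        congr 1
        have h3 : n - 1 = n / L.length * L.length + (n % L.length - 1) := by
          conv_lhs => rw [hn']
          rw [Nat.add_sub_assoc (by omega : 1 ≤ n % L.length)]
        rw [h3, hmodlem]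
        exact Nat.mod_eq_of_lt (by omega)
      · rw [if_neg hrpos]
        have hr00 : n % L.length = 0 := by
          rw [hcast_mod] at hrpos; omega
        have hLne : L ≠ [] := List.ne_nil_of_length_pos hLpos
        rw [PySem.List.pyGetD_neg_one L 0 hLne, List.getLast_eq_getElem,
            List.getD_eq_getElem _ 0 (Nat.mod_lt _ hLpos)]
        congr 1
        have hq1 : 0 < n / L.length := by
          rcases Nat.eq_zero_or_pos (n / L.length) with h | h
          · exfalso; rw [h, Nat.zero_mul, Nat.zero_add, hr00] at hn'; omega
          · exact h
        have h3 : n - 1 = (n / L.length - 1) * L.length + (L.length - 1) := by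
          calc n - 1 = n / L.length * L.length + n % L.length - 1 := by rw [← hn']
            _ = n / L.length * L.length - 1 := by rw [hr00, Nat.add_zero]
            _ = ((n / L.length - 1) + 1) * L.length - 1 := by
                  congr 2
                  omega
            _ = (n / L.length - 1) * L.length + L.length - 1 := by rw [Nat.add_mul, Nat.one_mul]
            _ = (n / L.length - 1) * L.length + (L.length - 1) := by
                  rw [Nat.add_sub_assoc (by omega : 1 ≤ L.length)]
        rw [h3, hmodlem]
        exact Nat.mod_eq_of_lt (by omega)
    rw [← hlast]
    -- last pit facts
    have hlastmem : L.getD ((n - 1) % L.length) 0 ∈ L := by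
      rw [List.getD_eq_getElem _ 0 (Nat.mod_lt _ hLpos)]
      exact List.getElem_mem _
    obtain ⟨hl0, hl14⟩ := hmem _ hlastmem
    have hfinlen : 14 ≤ ((L.take (n % L.length)).foldl
        (fun bb q => PySem.List.pySetD bb q (PySem.List.pyGetD bb q 0 + 1)) B1).length := by
      rw [lenB2, lenB1]; omega
    rw [capture_equiv p _ hp hl0 hl14 _ hfinlen]
    simp only [playerScoreDish, getOpponentId_eq p hp]
  · -- no seeds to sow: the zeroed board is returned on both sides
    have hzero : seeds.toNat = 0 := by omega
    rw [hzero, if_neg hs]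
    simp only [sowSeeds]
    have hcapA : tryCapture pit p zb = zb := by
      unfold tryCapture
      rw [if_pos (by rw [hzbpit]; norm_num)]
    have hcapB : captureAlt pit ((p + 1) * 7 - 1) (ownPits p) zb = zb := by
      unfold captureAlt
      rw [if_pos (Or.inl (by rw [hzbpit]; norm_num))]
    rw [hcapA, hcapB]
    simp only [playerScoreDish, getOpponentId_eq p hp]

-- ===== VERDICT (by name: the statement is the Claim_ definition above) =====
theorem sow_spec : Claim_equal_sow := by
  intro pit p board _ hpre
  show sow pit p board = sow_alt pit p board
  by_cases hG : ((p = 0 ∧ pit < 6) ∨ (p = 1 ∧ 6 < pit ∧ pit < 13))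
  · have hA : isPlayerPit pit p = true := (isPlayerPit_iff pit p).2 hG
    obtain ⟨hinr, hbig⟩ := hpre hG
    have hzbpit : PySem.List.pyGetD (PySem.List.pySetD board pit 0) pit 0 = 0 := by
      obtain ⟨hk, hget, hset⟩ := py_idx_norm board pit hinr
      rw [hset 0]
      have hinr2 : PySem.Raise.InRange (board.set (pyNormIdx board.length pit) 0).length pit := by
        rw [List.length_set]; exact hinr
      obtain ⟨hk2, hget2, hset2⟩ := py_idx_norm _ pit hinr2
      rw [hget2 0]
      have hkk : pyNormIdx (board.set (pyNormIdx board.length pit) 0).length pit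
          = pyNormIdx board.length pit := by rw [List.length_set]
      rw [hkk, List.getD_eq_getElem _ 0 (by rw [List.length_set]; exact hk)]
      exact List.getElem_set_self _
    rcases hG with ⟨rfl, h6⟩ | ⟨rfl, h7, h13⟩
    · by_cases hneg : pit < 0
      · -- negative pit_id, player 0: A sows from the wrapped pit; B does the same
        obtain ⟨m, hm⟩ : ∃ m, PySem.Int.mod (pit + 1) 14 = m := ⟨_, rfl⟩
        have hm0 : 0 ≤ m := hm ▸ PySem.Int.mod_nonneg (pit + 1) (by norm_num)
        have hm14 : m < 14 := hm ▸ PySem.Int.mod_lt (pit + 1) (by norm_num)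
        interval_cases m <;>
          exact sow_branch pit 0 board _ (Or.inl rfl) (Or.inl ⟨rfl, h6⟩) hA
            (by rw [hm, filter_drop_pit _ _ pit hneg (by decide)])
            (by decide) (by decide)
            (by simp only [nextPit_of_neg hneg]; unfold nextPitN; rw [hm]; decide)
            (by simp only [nextPit_of_neg hneg]; decide)
            hzbpit hbig
      · have hge : 0 ≤ pit := by omega
        interval_cases pit <;>
          exact sow_branch _ 0 board _ (Or.inl rfl) (Or.inl ⟨rfl, by norm_num⟩) hA rfl
            (by decide) (by decide) (by decide) (by decide) hzbpit hbig
    · interval_cases pit <;>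
        exact sow_branch _ 1 board _ (Or.inr rfl) (Or.inr ⟨rfl, by norm_num, by norm_num⟩) hA rfl
          (by decide) (by decide) (by decide) (by decide) hzbpit hbig
  · have hA : ¬ (isPlayerPit pit p = true) := fun h => hG ((isPlayerPit_iff pit p).1 h)
    unfold sow sow_alt
    rw [if_pos hA, if_pos hG]
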